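-- pv_equiv track=rewrite | github.com/jashapiro/rsp-evaluator | test_models.py | get_recommended_models_to_test
-- ===== SOURCE A (Python) =====
-- def get_recommended_models_to_test(
--     installed_models: list[str],
--     recommended_models: list[tuple[str, str]]
-- ) -> list[str]:
--     """Get recommended models that are already installed."""
--     models_to_test = []
--     for model, _ in recommended_models:
--         # Check if model is installed
--         # If recommended model has a specific tag (e.g., qwen2.5:32b), require exact match
--         # If no tag specified, match by base name
--         if ":" in model:
--             # Exact tag specified - require exact match
--             recommended_base, recommended_tag = model.split(":", 1)
--             for installed in installed_models:
--                 installed_base = installed.split(":")[0]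
--                 installed_tag = installed.split(":", 1)[1] if ":" in installed else "latest"
--                 if recommended_base == installed_base and recommended_tag == installed_tag:
--                     models_to_test.append(installed)
--                     break
--         else:
--             # No tag specified - match any version of this model
--             for installed in installed_models:
--                 if model == installed.split(":")[0]:
--                     models_to_test.append(installed)
--                     break
--     return models_to_test
-- ===== SOURCE B (Python) =====
-- def get_recommended_models_to_test(
--     installed_models: list[str],
--     recommended_models: list[tuple[str, str]]
-- ) -> list[str]:
--     """Get recommended models that are already installed.
--
--     One pass indexes installed models by base name and by (base, tag)
--     (keeping the first occurrence, tag defaulting to "latest"); each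
--     recommendation is then resolved with a single dict lookup.
--     """
--     by_base = {}
--     by_base_tag = {}
--     for installed in installed_models:
--         base = installed.split(":")[0]
--         tag = installed.split(":", 1)[1] if ":" in installed else "latest"
--         if base not in by_base:
--             by_base[base] = installed
--         if (base, tag) not in by_base_tag:
--             by_base_tag[(base, tag)] = installed
--
--     models_to_test = []
--     for model, _ in recommended_models:
--         if ":" in model:
--             recommended_base, recommended_tag = model.split(":", 1)
--             hit = by_base_tag.get((recommended_base, recommended_tag))
--         else:
--             hit = by_base.get(model)
--         if hit is not None:
--             models_to_test.append(hit)
--     return models_to_test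
-- ===== Notes on version B (the rewrite author's own statement) =====
-- stated objective: faster
-- what changed: B replaces A's inner linear scan of installed_models per recommendation with two dicts built in one pass (first occurrence by base name and by (base, tag)), so each recommendation is resolved by a single O(1) lookup.
import Mathlib
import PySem

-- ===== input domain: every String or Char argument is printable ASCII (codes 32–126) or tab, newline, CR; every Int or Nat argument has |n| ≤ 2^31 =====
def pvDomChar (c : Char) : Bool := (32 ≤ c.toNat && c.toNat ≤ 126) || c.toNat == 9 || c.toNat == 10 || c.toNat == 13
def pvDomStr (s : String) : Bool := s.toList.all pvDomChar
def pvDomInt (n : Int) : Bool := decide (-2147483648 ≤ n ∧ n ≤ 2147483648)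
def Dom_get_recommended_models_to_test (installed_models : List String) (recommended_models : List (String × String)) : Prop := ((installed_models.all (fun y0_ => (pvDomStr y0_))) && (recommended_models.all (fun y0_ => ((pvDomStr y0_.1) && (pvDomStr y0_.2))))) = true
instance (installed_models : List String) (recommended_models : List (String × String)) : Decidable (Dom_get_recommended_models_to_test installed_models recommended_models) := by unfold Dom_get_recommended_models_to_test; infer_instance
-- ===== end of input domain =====

-- B builds two first-occurrence dicts over installed_models once and answers each
-- recommendation by one lookup, instead of A's inner scan per recommendation.

-- ===== PORT A =====
-- shared parsing helpers (both Pythons contain these exact expressions):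
-- s.split(":")[0]  — split? with a non-empty sep is always some and non-empty, so the defaults are never used
def pvBase (s : String) : String := ((PySem.Str.split? s ":").getD []).headD ""
-- s.split(":", 1)[1] if ":" in s else "latest" — with ":" in s the split has 2 parts, defaults unused
def pvTag (s : String) : String :=
  if PySem.Str.isIn ":" s then ((PySem.Str.splitMax? s ":" 1).getD []).getD 1 "" else "latest"

def get_recommended_models_to_test (installed_models : List String) (recommended_models : List (String × String)) : List String :=
  recommended_models.foldl (fun models_to_test p =>
    let model := p.1
    if PySem.Str.isIn ":" model then
      -- recommended_base, recommended_tag = model.split(":", 1)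
      let parts := (PySem.Str.splitMax? model ":" 1).getD []
      let recommended_base := parts.getD 0 ""
      let recommended_tag := parts.getD 1 ""
      -- inner for-loop over installed_models with break = first match
      match installed_models.find? (fun installed =>
          pvBase installed == recommended_base && pvTag installed == recommended_tag) with
      | some installed => models_to_test ++ [installed]
      | none => models_to_test
    else
      match installed_models.find? (fun installed => model == pvBase installed) with
      | some installed => models_to_test ++ [installed]
      | none => models_to_test) []

-- ===== PORT B =====
-- one pass over installed_models: first-occurrence dicts keyed by base and by (base, tag)
def pvIndex (installed_models : List String) :
    PySem.Dict String String × PySem.Dict (String × String) String :=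
  installed_models.foldl (fun dd installed =>
    let base := pvBase installed
    let tag := pvTag installed
    let d1 := if dd.1.contains base then dd.1 else dd.1.insert base installed
    let d2 := if dd.2.contains (base, tag) then dd.2 else dd.2.insert (base, tag) installed
    (d1, d2)) (PySem.Dict.empty, PySem.Dict.empty)

def get_recommended_models_to_test_alt (installed_models : List String) (recommended_models : List (String × String)) : List String :=
  let dd := pvIndex installed_models
  recommended_models.foldl (fun models_to_test p =>
    let model := p.1
    let hit :=
      if PySem.Str.isIn ":" model then
        let parts := (PySem.Str.splitMax? model ":" 1).getD []
        dd.2.get? (parts.getD 0 "", parts.getD 1 "")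
      else dd.1.get? model
    match hit with
    | some installed => models_to_test ++ [installed]
    | none => models_to_test) []

-- ===== PRECONDITION & SPEC =====
def Spec_get_recommended_models_to_test (installed_models : List String) (recommended_models : List (String × String)) (out : List String) : Prop := out = get_recommended_models_to_test_alt installed_models recommended_models
instance (installed_models : List String) (recommended_models : List (String × String)) (out : List String) : Decidable (Spec_get_recommended_models_to_test installed_models recommended_models out) := by unfold Spec_get_recommended_models_to_test; infer_instance

-- ===== CLAIM (what is proved, stated in full; the proofs are below) =====
def Claim_equal_get_recommended_models_to_test : Prop := ∀ (installed_models : List String) (recommended_models : List (String × String)), Dom_get_recommended_models_to_test installed_models recommended_models → Spec_get_recommended_models_to_test installed_models recommended_models (get_recommended_models_to_test installed_models recommended_models)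

-- ===== LEMMAS AND PROOFS =====

-- a first-occurrence insertion step, seen through get?
theorem insFresh_get? {κ : Type} [BEq κ] [LawfulBEq κ]
    (d : PySem.Dict κ String) (k k' : κ) (v : String) :
    (if d.contains k then d else d.insert k v).get? k'
      = (d.get? k').or (if k' == k then some v else none) := by
  by_cases hk : k' = k
  · subst hk
    by_cases hc : d.contains k' = true
    · rw [if_pos hc]
      rw [PySem.Dict.contains_eq_isSome_get?] at hc
      cases h : d.get? k' with
      | none => rw [h] at hc; simp at hc
      | some w => simp
    · rw [if_neg hc]
      have h0 : d.get? k' = none := by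
        rw [PySem.Dict.contains_eq_isSome_get?] at hc
        cases h : d.get? k' with
        | none => rfl
        | some w => rw [h] at hc; simp at hc
      simp [h0, PySem.Dict.get?_insert_self]
  · have hne : (k' == k) = false := by simp [hk]
    rw [hne]
    split
    · simp
    · rw [PySem.Dict.get?_insert_of_ne _ _ hk]; simp

-- the first-occurrence dicts answer lookups exactly like a first-match scan
theorem pvIndex_get? (installed_models : List String)
    (d1 : PySem.Dict String String) (d2 : PySem.Dict (String × String) String)
    (b : String) (k : String × String) :
    ((installed_models.foldl (fun dd installed =>
        let base := pvBase installed
        let tag := pvTag installed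
        let d1 := if dd.1.contains base then dd.1 else dd.1.insert base installed
        let d2 := if dd.2.contains (base, tag) then dd.2 else dd.2.insert (base, tag) installed
        (d1, d2)) (d1, d2)).1.get? b
      = (d1.get? b).or (installed_models.find? (fun i => pvBase i == b)))
    ∧ ((installed_models.foldl (fun dd installed =>
        let base := pvBase installed
        let tag := pvTag installed
        let d1 := if dd.1.contains base then dd.1 else dd.1.insert base installed
        let d2 := if dd.2.contains (base, tag) then dd.2 else dd.2.insert (base, tag) installed
        (d1, d2)) (d1, d2)).2.get? k
      = (d2.get? k).or (installed_models.find? (fun i => (pvBase i, pvTag i) == k))) := by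
  induction installed_models generalizing d1 d2 with
  | nil => simp
  | cons i rest ih =>
    simp only [List.foldl_cons]
    constructor
    · rw [(ih _ _).1, insFresh_get?]
      by_cases hb : pvBase i = b
      · rw [List.find?_cons_of_pos (by simp [hb])]
        have : (b == pvBase i) = true := by simp [hb]
        rw [this, Option.or_assoc]
        simp
      · rw [List.find?_cons_of_neg (by simp [hb])]
        have : (b == pvBase i) = false := by simp [Ne.symm hb]
        rw [this]
        simp
    · rw [(ih _ _).2, insFresh_get?]
      by_cases hk : (pvBase i, pvTag i) = k
      · rw [List.find?_cons_of_pos (by simp [hk])]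
        have : (k == (pvBase i, pvTag i)) = true := by simp [hk]
        rw [this, Option.or_assoc]
        simp
      · rw [List.find?_cons_of_neg (by simp [hk])]
        have : (k == (pvBase i, pvTag i)) = false := by simp [Ne.symm hk]
        rw [this]
        simp

-- corollaries at the empty dicts, phrased on pvIndex itself
theorem pvIndex_fst_get? (installed_models : List String) (b : String) :
    (pvIndex installed_models).1.get? b
      = installed_models.find? (fun i => pvBase i == b) := by
  unfold pvIndex
  rw [(pvIndex_get? installed_models PySem.Dict.empty PySem.Dict.empty b (b, b)).1]
  simp

theorem pvIndex_snd_get? (installed_models : List String) (k : String × String) :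
    (pvIndex installed_models).2.get? k
      = installed_models.find? (fun i => (pvBase i, pvTag i) == k) := by
  unfold pvIndex
  rw [(pvIndex_get? installed_models PySem.Dict.empty PySem.Dict.empty "" k).2]
  simp

-- ===== VERDICT (by name: the statement is the Claim_ definition above) =====
theorem get_recommended_models_to_test_spec : Claim_equal_get_recommended_models_to_test := by
  intro installed_models recommended_models _
  unfold Spec_get_recommended_models_to_test get_recommended_models_to_test get_recommended_models_to_test_alt
  congr 1
  funext acc p
  by_cases h : PySem.Str.isIn ":" p.1 = true
  · simp only [h, if_true, pvIndex_snd_get?]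
    have heq : (fun i => ((pvBase i, pvTag i) ==
        (((PySem.Str.splitMax? p.1 ":" 1).getD []).getD 0 "", ((PySem.Str.splitMax? p.1 ":" 1).getD []).getD 1 "")))
        = (fun i => pvBase i == ((PySem.Str.splitMax? p.1 ":" 1).getD []).getD 0 ""
            && pvTag i == ((PySem.Str.splitMax? p.1 ":" 1).getD []).getD 1 "") := by
      funext i; rfl
    rw [heq]
  · simp only [Bool.not_eq_true] at h
    simp only [h, Bool.false_eq_true, if_false, pvIndex_fst_get?]
    have heq : (fun i => pvBase i == p.1) = (fun i => p.1 == pvBase i) := by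
      funext i
      by_cases hx : pvBase i = p.1
      · simp [hx]
      · simp [hx, Ne.symm hx]
    rw [heq]
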